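-- pv_equiv track=rewrite | github.com/Jai-12-cpu/Cyberventure | backend/game.py | game_24_check_operation
-- ===== SOURCE A (Python) =====
-- def game_24_check_operation(oper):
--     allowed = '1234567890+-*/() '
--     is_number = False
--     for i in oper:
--         if i not in allowed:
--             return False
--         try:
--             num = int(i)
--             if is_number:
--                 return False  # catch concatenation of numbers
--             is_number = True
--         except Exception:
--             is_number = False
--             pass
--     return True
-- ===== SOURCE B (Python) =====
-- def game_24_check_operation(oper):
--     allowed = set('1234567890+-*/() ')
--     if not set(oper) <= allowed:
--         return False
--     digits = '0123456789'
--     return not any(a in digits and b in digits for a, b in zip(oper, oper[1:]))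
-- ===== Notes on version B (the rewrite author's own statement) =====
-- stated objective: simpler
-- what changed: Replaces the single fused loop with a carried is_number flag and try/except by two independent passes: a whole-string allowed-set check, then a pairwise adjacent-digit scan over zip(oper, oper[1:]).
import Mathlib
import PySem

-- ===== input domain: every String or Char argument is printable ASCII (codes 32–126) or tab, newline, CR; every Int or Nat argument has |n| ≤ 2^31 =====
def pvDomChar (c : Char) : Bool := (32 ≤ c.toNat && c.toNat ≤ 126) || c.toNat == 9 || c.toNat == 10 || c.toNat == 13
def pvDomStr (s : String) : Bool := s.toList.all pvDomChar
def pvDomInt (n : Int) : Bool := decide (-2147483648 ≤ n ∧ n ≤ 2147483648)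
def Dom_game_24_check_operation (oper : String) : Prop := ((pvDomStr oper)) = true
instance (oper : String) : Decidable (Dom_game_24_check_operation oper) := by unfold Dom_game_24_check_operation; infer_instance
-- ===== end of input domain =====

-- B replaces A's single fused loop with a carried is_number flag by two independent passes
-- (an allowed-set membership check over the whole string, then an adjacent-digit pairwise scan); objective: simpler.

-- ===== PORT A =====
-- A's loop: early return False on a disallowed char; int(i) on a single printable-ASCII char
-- succeeds exactly when the char is '0'..'9' (ported as Char.isDigit), carrying the is_number flag.
def gameALoop : List Char → Bool → Bool
  | [], _ => true
  | c :: rest, isNum =>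
    if (("1234567890+-*/() " : String).toList.contains c) then
      if c.isDigit then
        if isNum then false else gameALoop rest true
      else gameALoop rest false
    else false

def game_24_check_operation (oper : String) : Bool :=
  gameALoop oper.toList false

-- ===== PORT B =====
-- Pass 1: every char lies in the allowed set.
def gameAllowedAll (l : List Char) : Bool :=
  l.all (fun c => ("1234567890+-*/() " : String).toList.contains c)

-- Pass 2: pairwise scan of zip(oper, oper[1:]) for two adjacent digit chars.
def gameAdjDigits : List Char → Bool
  | a :: b :: rest =>
      ((("0123456789" : String).toList.contains a) &&
       (("0123456789" : String).toList.contains b)) || gameAdjDigits (b :: rest)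
  | _ => false

def game_24_check_operation_alt (oper : String) : Bool :=
  gameAllowedAll oper.toList && !gameAdjDigits oper.toList

-- ===== PRECONDITION & SPEC =====
def Spec_game_24_check_operation (oper : String) (out : Bool) : Prop := out = game_24_check_operation_alt oper
instance (oper : String) (out : Bool) : Decidable (Spec_game_24_check_operation oper out) := by unfold Spec_game_24_check_operation; infer_instance

-- ===== CLAIM (what is proved, stated in full; the proofs are below) =====
def Claim_equal_game_24_check_operation : Prop := ∀ (oper : String), Dom_game_24_check_operation oper → Spec_game_24_check_operation oper (game_24_check_operation oper)

-- ===== LEMMAS AND PROOFS =====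

theorem char_eq_iff_toNat (c d : Char) : (c = d) ↔ c.toNat = d.toNat :=
  ⟨fun h => by rw [h], fun h => Char.ext (UInt32.toNat_inj.mp h)⟩

theorem digit_contains_iff (c : Char) :
    (("0123456789" : String).toList.contains c) = c.isDigit := by
  have h : ("0123456789" : String).toList = ['0', '1', '2', '3', '4', '5', '6', '7', '8', '9'] := by decide
  rw [h, Bool.eq_iff_iff]
  simp only [List.contains_eq_mem, List.mem_cons, List.not_mem_nil, or_false,
    decide_eq_true_eq, Char.isDigit, Bool.and_eq_true, decide_eq_true_eq,
    char_eq_iff_toNat, UInt32.le_iff_toNat_le]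
  have hv : c.val.toNat = c.toNat := rfl
  rw [hv]
  have h0 : ('0' : Char).toNat = 48 := by decide
  have h1 : ('1' : Char).toNat = 49 := by decide
  have h2 : ('2' : Char).toNat = 50 := by decide
  have h3 : ('3' : Char).toNat = 51 := by decide
  have h4 : ('4' : Char).toNat = 52 := by decide
  have h5 : ('5' : Char).toNat = 53 := by decide
  have h6 : ('6' : Char).toNat = 54 := by decide
  have h7 : ('7' : Char).toNat = 55 := by decide
  have h8 : ('8' : Char).toNat = 56 := by decide
  have h9 : ('9' : Char).toNat = 57 := by decide
  have ha : ('0' : Char).val.toNat = 48 := by decide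
  have hb : ('9' : Char).val.toNat = 57 := by decide
  rw [h0, h1, h2, h3, h4, h5, h6, h7, h8, h9, ha, hb]
  omega

-- head-digit flag used to state the loop invariant
def gameHeadDigit : List Char → Bool
  | [] => false
  | c :: _ => c.isDigit

theorem gameALoop_eq (l : List Char) (isNum : Bool) :
    gameALoop l isNum =
      (gameAllowedAll l && !(isNum && gameHeadDigit l) && !gameAdjDigits l) := by
  induction l generalizing isNum with
  | nil => simp [gameALoop, gameAllowedAll, gameAdjDigits, gameHeadDigit]
  | cons c rest ih =>
    simp only [gameALoop, gameAllowedAll, List.all_cons, gameHeadDigit]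
    by_cases hc : (("1234567890+-*/() " : String).toList.contains c) = true
    · rw [hc]
      cases rest with
      | nil =>
        simp only [gameAdjDigits]
        cases hd : c.isDigit <;> cases isNum <;>
          simp [gameALoop, gameAllowedAll]
      | cons b r =>
        simp only [gameAdjDigits, digit_contains_iff, ih, gameAllowedAll,
          List.all_cons, gameHeadDigit]
        cases hd : c.isDigit <;> cases isNum <;> cases hb : b.isDigit <;> simp
    · simp only [Bool.not_eq_true] at hc
      rw [hc]
      simp

-- ===== VERDICT (by name: the statement is the Claim_ definition above) =====
theorem game_24_check_operation_spec : Claim_equal_game_24_check_operation := by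
  intro oper _
  unfold Spec_game_24_check_operation game_24_check_operation game_24_check_operation_alt
  rw [gameALoop_eq]
  simp
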